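-- pv_equiv track=rewrite | github.com/theguyoverthere/CMU15-112-Spring17 | src/Week3/Practice/leastFrequentLetters.py | minDigit
-- ===== SOURCE A (Python) =====
-- def minDigit(n):
--     smallestDigit = 9
--
--     while n > 0:
--         nthDigit = n % 10
--
--         if (nthDigit != 0) and (nthDigit < smallestDigit):
--             smallestDigit = nthDigit
--
--         n //= 10
--
--     return smallestDigit
-- ===== SOURCE B (Python) =====
-- def minDigit(n):
--     if n <= 0:
--         return 9
--     return min((ord(d) - 48 for d in str(n) if d != '0'), default=9)
-- ===== Notes on version B (the rewrite author's own statement) =====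
-- stated objective: idiomatic
-- what changed: Replaces the mod/div while-loop with a running-min accumulator by a single builtin min over the nonzero digit characters of str(n) (most-significant-first), guarding n<=0 with the same default 9.
import Mathlib
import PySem

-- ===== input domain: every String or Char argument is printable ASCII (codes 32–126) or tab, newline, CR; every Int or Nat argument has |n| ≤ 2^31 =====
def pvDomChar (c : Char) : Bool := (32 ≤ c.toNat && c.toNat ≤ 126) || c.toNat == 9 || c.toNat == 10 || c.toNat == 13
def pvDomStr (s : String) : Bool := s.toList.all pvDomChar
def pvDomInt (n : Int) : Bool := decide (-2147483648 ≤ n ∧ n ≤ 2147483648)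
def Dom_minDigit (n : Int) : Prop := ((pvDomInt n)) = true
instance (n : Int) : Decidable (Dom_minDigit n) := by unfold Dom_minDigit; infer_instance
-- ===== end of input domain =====

-- B replaces A's mod/div while-loop with a builtin min over the nonzero digit characters of str(n) (idiomatic; same cost).

-- ===== PORT A =====
def minDigitLoop (n smallestDigit : Int) : Int :=
  if 0 < n then
    let nthDigit := PySem.Int.mod n 10
    minDigitLoop (PySem.Int.floordiv n 10)
      (if nthDigit ≠ 0 ∧ nthDigit < smallestDigit then nthDigit else smallestDigit)
  else smallestDigit
termination_by n.toNat
decreasing_by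
  have h : PySem.Int.floordiv n 10 = n / 10 := PySem.Int.floordiv_eq_ediv_of_pos (by omega)
  rw [h]; omega

def minDigit (n : Int) : Int := minDigitLoop n 9

-- ===== PORT B =====
def minDigit_alt (n : Int) : Int :=
  if n ≤ 0 then 9
  else
    PySem.List.minD
      (((PySem.Int.toChars n).filter (fun c => c ≠ '0')).map (fun c => ((c.toNat : Int) - 48)))
      (fun x => x) 9

-- ===== PRECONDITION & SPEC =====
def Spec_minDigit (n : Int) (out : Int) : Prop := out = minDigit_alt n
instance (n : Int) (out : Int) : Decidable (Spec_minDigit n out) := by unfold Spec_minDigit; infer_instance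

-- ===== CLAIM (what is proved, stated in full; the proofs are below) =====
def Claim_equal_minDigit : Prop := ∀ (n : Int), Dom_minDigit n → Spec_minDigit n (minDigit n)

-- ===== LEMMAS AND PROOFS =====

theorem pv_digitChar_toNat {d : Nat} (hd : d < 10) : (Nat.digitChar d).toNat = 48 + d := by
  interval_cases d <;> decide

theorem pv_digitChar_eq_zero {d : Nat} (hd : d < 10) : (Nat.digitChar d = '0') ↔ d = 0 := by
  interval_cases d <;> decide

theorem pv_toDigitsCore_eq :
    ∀ (fuel m : Nat) (acc : List Char), 0 < m → m < fuel →
      Nat.toDigitsCore 10 fuel m acc = ((Nat.digits 10 m).map Nat.digitChar).reverse ++ acc := by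
  intro fuel
  induction fuel with
  | zero => intro m acc hm hf; omega
  | succ f ih =>
    intro m acc hm hf
    rw [Nat.toDigitsCore]
    rw [Nat.digits_def' (by norm_num : 1 < 10) hm]
    by_cases h : m / 10 = 0
    · simp [h, List.reverse_cons]
    · simp only [h]
      rw [ih (m / 10) _ (Nat.pos_of_ne_zero h) (by
        have := Nat.div_lt_self hm (by norm_num : 1 < 10); omega)]
      simp [List.reverse_cons, List.append_assoc]

theorem pv_loop_eq (m : Nat) :
    ∀ acc, minDigitLoop (m : Int) acc =
      List.foldl (fun a d => if d ≠ 0 ∧ d < a then d else a) acc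
        ((Nat.digits 10 m).map (fun d : Nat => (d : Int))) := by
  induction m using Nat.strong_induction_on with
  | _ m ih =>
    intro acc
    rw [minDigitLoop]
    by_cases hm : 0 < m
    · have hmod : PySem.Int.mod (m : Int) 10 = ((m % 10 : Nat) : Int) := by
        exact_mod_cast PySem.Int.mod_natCast m 10
      have hdiv : PySem.Int.floordiv (m : Int) 10 = ((m / 10 : Nat) : Int) := by
        exact_mod_cast PySem.Int.floordiv_natCast m 10
      rw [if_pos (by exact_mod_cast hm), hmod, hdiv,
        ih (m / 10) (Nat.div_lt_self hm (by norm_num)),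
        Nat.digits_def' (by norm_num : 1 < 10) hm]
      simp
    · have h0 : m = 0 := by omega
      subst h0
      simp

theorem pv_foldA_eq (l : List Int) :
    ∀ acc, List.foldl (fun a d => if d ≠ 0 ∧ d < a then d else a) acc l =
      List.foldl min acc (l.filter (fun d => d ≠ 0)) := by
  induction l with
  | nil => intro acc; rfl
  | cons d t ih =>
    intro acc
    by_cases hd : d = 0
    · subst hd; simp [ih]
    · rw [List.foldl_cons, List.filter_cons_of_pos (by simp [hd]), List.foldl_cons]
      have h2 : (if d ≠ 0 ∧ d < acc then d else acc) = min acc d := by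
        split_ifs with h <;> omega
      rw [h2, ih]

theorem pv_min?_some (t : List Int) :
    ∀ x : Int, PySem.List.min? (x :: t) (fun y => y) = some (List.foldl min x t) := by
  induction t with
  | nil => intro x; rfl
  | cons y t ih =>
    intro x
    by_cases hlt : y < x
    · have h1 : PySem.List.min? (x :: y :: t) (fun y => y)
          = PySem.List.min? (y :: t) (fun y => y) := by
        simp [PySem.List.min?, hlt]
      rw [h1, ih, List.foldl_cons, min_eq_right (le_of_lt hlt)]
    · have h1 : PySem.List.min? (x :: y :: t) (fun y => y)
          = PySem.List.min? (x :: t) (fun y => y) := by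
        simp [PySem.List.min?, hlt]
      rw [h1, ih, List.foldl_cons, min_eq_left (by omega)]

theorem pv_minD_eq_foldl (l : List Int) (c : Int) (h : ∀ x ∈ l, x ≤ c) :
    PySem.List.minD l (fun x => x) c = List.foldl min c l := by
  cases l with
  | nil => rfl
  | cons x t =>
    have hx : x ≤ c := h x (List.mem_cons_self ..)
    unfold PySem.List.minD
    rw [pv_min?_some, Option.getD_some, List.foldl_cons, min_eq_right hx]

theorem pv_foldl_min_reverse (l : List Int) (c : Int) :
    List.foldl min c l.reverse = List.foldl min c l := by
  haveI : RightCommutative (fun (a b : Int) => min a b) := ⟨fun a b c => by omega⟩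
  exact (List.reverse_perm l).foldl_eq c

theorem pv_altList (m : Nat) (hm : 0 < m) :
    (((PySem.Int.toChars (m : Int)).filter (fun c => c ≠ '0')).map
        (fun c => ((c.toNat : Int) - 48)))
    = (((Nat.digits 10 m).filter (fun d => d ≠ 0)).map (fun d : Nat => (d : Int))).reverse := by
  have ht : PySem.Int.toChars (m : Int) = ((Nat.digits 10 m).map Nat.digitChar).reverse := by
    simp only [PySem.Int.toChars]
    rw [if_neg (by omega), Int.toNat_natCast, Nat.toDigits,
      pv_toDigitsCore_eq (m + 1) m [] hm (by omega)]
    simp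
  rw [ht, List.filter_reverse, List.map_reverse]
  congr 1
  rw [List.filter_map]
  have hfil : List.filter ((fun c => c ≠ '0') ∘ Nat.digitChar) (Nat.digits 10 m)
      = List.filter (fun d => d ≠ 0) (Nat.digits 10 m) := by
    apply List.filter_congr
    intro d hd
    have : d < 10 := Nat.digits_lt_base (by norm_num) hd
    simp [pv_digitChar_eq_zero this]
  rw [hfil, List.map_map]
  apply List.map_congr_left
  intro d hd
  have hlt : d < 10 := Nat.digits_lt_base (by norm_num) (List.mem_of_mem_filter hd)
  simp [Function.comp, pv_digitChar_toNat hlt]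

-- ===== VERDICT (by name: the statement is the Claim_ definition above) =====
theorem minDigit_spec : Claim_equal_minDigit := by
  unfold Claim_equal_minDigit Spec_minDigit
  intro n _
  unfold minDigit minDigit_alt
  by_cases hn : n ≤ 0
  · rw [if_pos hn, minDigitLoop, if_neg (by omega)]
  · rw [if_neg hn]
    obtain ⟨m, rfl⟩ : ∃ m : Nat, n = (m : Int) := ⟨n.toNat, by omega⟩
    have hm : 0 < m := by exact_mod_cast not_le.mp hn
    rw [pv_loop_eq m 9, pv_foldA_eq, pv_altList m hm]
    have hcast : ((Nat.digits 10 m).map (fun d : Nat => (d : Int))).filter (fun d => d ≠ 0)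
        = ((Nat.digits 10 m).filter (fun d => d ≠ 0)).map (fun d : Nat => (d : Int)) := by
      rw [List.filter_map]
      congr 1
      apply List.filter_congr
      intro d _
      simp
    rw [hcast]
    rw [pv_minD_eq_foldl _ 9 (by
      intro x hx
      rw [List.mem_reverse, List.mem_map] at hx
      obtain ⟨d, hd, rfl⟩ := hx
      have : d < 10 := Nat.digits_lt_base (by norm_num) (List.mem_of_mem_filter hd)
      omega)]
    rw [pv_foldl_min_reverse]
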